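-- pv_equiv track=rewrite | github.com/bauyrjanj/leetcode | FB/revenue.py | milestone
-- ===== SOURCE A (Python) =====
-- def milestone(revenues, milestones):
--     s = 0
--     rolling = []
--     result = []
--     for i in range(len(revenues)):
--         s+=revenues[i]
--         rolling.append(s)
--
--     for milestone in milestones:
--         for e, r in enumerate(rolling):
--             if milestone<=r:
--                 result.append(e+1)
--                 break
--
--     return result
-- ===== SOURCE B (Python) =====
-- def milestone(revenues, milestones):
--     # Running maximum of the prefix sums: first month whose prefix sum reaches m
--     # equals first month whose running-max reaches m, and running-max is sorted,
--     # so each milestone is answered by one binary search.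
--     runmax = []
--     s = 0
--     best = None
--     for v in revenues:
--         s += v
--         if best is None or s > best:
--             best = s
--         runmax.append(best)
--     result = []
--     for goal in milestones:
--         if runmax and goal <= runmax[-1]:
--             lo, hi = 0, len(runmax)
--             while lo < hi:
--                 mid = (lo + hi) // 2
--                 if runmax[mid] < goal:
--                     lo = mid + 1
--                 else:
--                     hi = mid
--             result.append(lo + 1)
--     return result
-- ===== Notes on version B (the rewrite author's own statement) =====
-- stated objective: faster
-- what changed: Replaces the per-milestone linear scan of the prefix-sum list by a single pass building the running maximum of the prefix sums (a sorted list) followed by one binary search per milestone, skipping milestones exceeding the overall maximum.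
import Mathlib
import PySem

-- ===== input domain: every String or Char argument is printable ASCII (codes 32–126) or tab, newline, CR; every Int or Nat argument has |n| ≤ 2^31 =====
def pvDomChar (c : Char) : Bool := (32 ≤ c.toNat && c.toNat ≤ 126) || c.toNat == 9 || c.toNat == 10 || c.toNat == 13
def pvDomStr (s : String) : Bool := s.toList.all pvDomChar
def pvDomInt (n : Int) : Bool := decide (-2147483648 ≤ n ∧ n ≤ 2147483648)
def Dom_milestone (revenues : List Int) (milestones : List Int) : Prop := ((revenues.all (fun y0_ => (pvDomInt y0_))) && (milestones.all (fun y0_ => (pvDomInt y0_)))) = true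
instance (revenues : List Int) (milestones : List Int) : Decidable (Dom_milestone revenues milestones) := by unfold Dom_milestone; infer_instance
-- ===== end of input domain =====

-- B replaces A's per-milestone linear scan of the prefix sums by a running-max
-- array (sorted) plus one binary search per milestone (objective: faster).

-- ===== PORT A =====
-- inner 'for e, r in enumerate(rolling): if milestone <= r: … break' loop
def findIdx1 : List Int → Int → Nat → Option Nat
  | [], _, _ => none
  | r :: rest, m, e => if m ≤ r then some e else findIdx1 rest m (e + 1)

def milestone (revenues : List Int) (milestones : List Int) : List Int :=
  let rolling := (revenues.foldl (fun (acc : Int × List Int) v =>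
      (acc.1 + v, acc.2 ++ [acc.1 + v])) (0, [])).2
  milestones.foldl (fun result m =>
    match findIdx1 rolling m 0 with
    | some e => result ++ [(e : Int) + 1]
    | none => result) []

-- ===== PORT B =====
-- 'best = s if best is None or s > best else best'
def cmb (best : Option Int) (s : Int) : Int :=
  match best with
  | none => s
  | some b => if s > b then s else b

def buildRunmax : List Int → Int → Option Int → List Int → List Int
  | [], _, _, acc => acc
  | v :: rest, s, best, acc =>
    let s' := s + v
    let b' := cmb best s'
    buildRunmax rest s' (some b') (acc ++ [b'])

-- the 'while lo < hi' bisect_left loop of Source B; the loop shrinks hi - lo each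
-- iteration, so hi - lo is a fuel bound making the recursion structural
def bsearchGo : List Int → Int → Nat → Nat → Nat → Nat
  | _, _, lo, _, 0 => lo
  | runmax, goal, lo, hi, fuel + 1 =>
    if lo < hi then
      let mid := (lo + hi) / 2
      if runmax.getD mid 0 < goal then bsearchGo runmax goal (mid + 1) hi fuel
      else bsearchGo runmax goal lo mid fuel
    else lo

def bsearch (runmax : List Int) (goal : Int) (lo hi : Nat) : Nat :=
  bsearchGo runmax goal lo hi (hi - lo)

def milestone_alt (revenues : List Int) (milestones : List Int) : List Int :=
  let runmax := buildRunmax revenues 0 none []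
  milestones.foldl (fun result goal =>
    match runmax.getLast? with
    | some last =>
        if goal ≤ last then
          result ++ [(bsearch runmax goal 0 runmax.length : Int) + 1]
        else result
    | none => result) []

-- ===== PRECONDITION & SPEC =====
def Spec_milestone (revenues : List Int) (milestones : List Int) (out : List Int) : Prop := out = milestone_alt revenues milestones
instance (revenues : List Int) (milestones : List Int) (out : List Int) : Decidable (Spec_milestone revenues milestones out) := by unfold Spec_milestone; infer_instance

-- ===== CLAIM (what is proved, stated in full; the proofs are below) =====
def Claim_equal_milestone : Prop := ∀ (revenues : List Int) (milestones : List Int), Dom_milestone revenues milestones → Spec_milestone revenues milestones (milestone revenues milestones)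

-- ===== LEMMAS AND PROOFS =====

-- prefix sums of revenues starting from running sum s
def prefixes : Int → List Int → List Int
  | _, [] => []
  | s, v :: rest => (s + v) :: prefixes (s + v) rest

-- running maximum of a list, seeded with an optional current best
def rmx : List Int → Option Int → List Int
  | [], _ => []
  | p :: rest, best => cmb best p :: rmx rest (some (cmb best p))

theorem foldl_rolling (rev : List Int) (s : Int) (acc : List Int) :
    (rev.foldl (fun (acc : Int × List Int) v => (acc.1 + v, acc.2 ++ [acc.1 + v])) (s, acc)).2
      = acc ++ prefixes s rev := by
  induction rev generalizing s acc with
  | nil => simp [prefixes]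
  | cons v rest ih => simp [prefixes, ih]

theorem buildRunmax_eq (rev : List Int) (s : Int) (best : Option Int) (acc : List Int) :
    buildRunmax rev s best acc = acc ++ rmx (prefixes s rev) best := by
  induction rev generalizing s best acc with
  | nil => simp [buildRunmax, prefixes, rmx]
  | cons v rest ih => simp [buildRunmax, prefixes, rmx, ih]

theorem rmx_ge (R : List Int) (b : Int) : ∀ x ∈ rmx R (some b), b ≤ x := by
  induction R generalizing b with
  | nil => simp [rmx]
  | cons p rest ih =>
    intro x hx
    simp only [rmx, List.mem_cons] at hx
    rcases hx with h | h
    · subst h; simp only [cmb]; split <;> omega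
    · have := ih (cmb (some b) p) x h
      simp only [cmb] at this ⊢
      split at this <;> omega

theorem rmx_pairwise (R : List Int) (best : Option Int) :
    List.Pairwise (· ≤ ·) (rmx R best) := by
  induction R generalizing best with
  | nil => simp [rmx]
  | cons p rest ih =>
    simp only [rmx]
    exact List.pairwise_cons.2 ⟨rmx_ge rest (cmb best p), ih _⟩

-- the first index reaching m is the same in the list and its running maximum
theorem ffEq (R : List Int) (m : Int) (k : Nat) (best : Option Int)
    (h : ∀ b, best = some b → ¬ m ≤ b) :
    findIdx1 R m k = findIdx1 (rmx R best) m k := by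
  induction R generalizing k best with
  | nil => simp [rmx]
  | cons p rest ih =>
    simp only [rmx, findIdx1]
    by_cases hp : m ≤ p
    · have hb : m ≤ cmb best p := by
        cases best with
        | none => simpa [cmb]
        | some b =>
          have := h b rfl
          simp only [cmb]; split <;> omega
      simp [hp, hb]
    · have hb : ¬ m ≤ cmb best p := by
        cases best with
        | none => simp only [cmb]; omega
        | some b =>
          have := h b rfl
          simp only [cmb]; split <;> omega
      simp only [if_neg hp, if_neg hb]
      exact ih (k + 1) (some (cmb best p)) (by intro b hb'; cases hb'; exact hb)

theorem ff_shift (xs : List Int) (m : Int) (k : Nat) :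
    findIdx1 xs m k = (findIdx1 xs m 0).map (· + k) := by
  induction xs generalizing k with
  | nil => simp [findIdx1]
  | cons x rest ih =>
    simp only [findIdx1]
    by_cases hx : m ≤ x
    · simp [hx]
    · simp only [if_neg hx, ih (k + 1), ih 1]
      cases findIdx1 rest m 0
      · simp
      · simp; omega

theorem ff_none (xs : List Int) (m : Int) :
    findIdx1 xs m 0 = none ↔ ∀ x ∈ xs, ¬ m ≤ x := by
  induction xs with
  | nil => simp [findIdx1]
  | cons x rest ih =>
    simp only [findIdx1]
    by_cases hx : m ≤ x
    · simp [hx]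
    · rw [if_neg hx, ff_shift rest m 1]
      constructor
      · intro hmap y hy
        rcases List.mem_cons.1 hy with rfl | hy'
        · exact hx
        · exact (ih.1 (by simpa using hmap)) y hy'
      · intro hall
        simp [ih.2 (fun y hy => hall y (List.mem_cons_of_mem _ hy))]

theorem ff_spec (xs : List Int) (m : Int) (i : Nat) (h : findIdx1 xs m 0 = some i) :
    i < xs.length ∧ m ≤ xs.getD i 0 ∧ ∀ j < i, ¬ m ≤ xs.getD j 0 := by
  induction xs generalizing i with
  | nil => simp [findIdx1] at h
  | cons x rest ih =>
    simp only [findIdx1] at h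
    by_cases hx : m ≤ x
    · simp only [if_pos hx] at h
      cases h
      exact ⟨by simp, by simpa, by omega⟩
    · simp only [if_neg hx, ff_shift rest m 1] at h
      cases hi : findIdx1 rest m 0 with
      | none => simp [hi] at h
      | some i' =>
        simp only [hi, Option.map_some] at h
        cases h
        obtain ⟨h1, h2, h3⟩ := ih i' hi
        refine ⟨by simpa using h1, by simpa using h2, ?_⟩
        intro j hj
        cases j with
        | zero => simpa using hx
        | succ j' => simpa using h3 j' (by omega)

theorem pairwise_getD_mono (M : List Int) (hM : List.Pairwise (· ≤ ·) M)
    (i j : Nat) (hij : i ≤ j) (hj : j < M.length) : M.getD i 0 ≤ M.getD j 0 := by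
  rcases eq_or_lt_of_le hij with rfl | hlt
  · exact le_refl _
  · have := (List.pairwise_iff_getElem.1 hM) i j (by omega) hj hlt
    rwa [List.getD_eq_getElem M 0 (by omega), List.getD_eq_getElem M 0 hj]

theorem bsearch_spec (M : List Int) (m : Int) (idx : Nat)
    (hM : List.Pairwise (· ≤ ·) M)
    (_hlen : idx < M.length) (hge : m ≤ M.getD idx 0)
    (hlt : ∀ j < idx, ¬ m ≤ M.getD j 0) :
    ∀ lo hi, lo ≤ idx → idx ≤ hi → hi ≤ M.length → bsearch M m lo hi = idx := by
  have hgo : ∀ fuel lo hi, hi - lo ≤ fuel → lo ≤ idx → idx ≤ hi → hi ≤ M.length →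
      bsearchGo M m lo hi fuel = idx := by
    intro fuel
    induction fuel with
    | zero => intro lo hi h0 h1 h2 _; simp only [bsearchGo]; omega
    | succ fuel ih =>
      intro lo hi h0 h1 h2 h3
      simp only [bsearchGo]
      by_cases h : lo < hi
      · rw [if_pos h]
        by_cases hc : M.getD ((lo + hi) / 2) 0 < m
        · rw [if_pos hc]
          have hmlt : (lo + hi) / 2 < idx := by
            by_contra hcc
            exact absurd (le_trans hge (pairwise_getD_mono M hM idx ((lo + hi) / 2)
              (by omega) (by omega))) (by omega)
          exact ih _ _ (by omega) (by omega) h2 h3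
        · rw [if_neg hc]
          have hmge : idx ≤ (lo + hi) / 2 := by
            by_contra hcc
            exact hlt ((lo + hi) / 2) (by omega) (by omega)
          exact ih _ _ (by omega) h1 hmge (by omega)
      · rw [if_neg h]; omega
  intro lo hi h1 h2 h3
  exact hgo (hi - lo) lo hi (by omega) h1 h2 h3

theorem pairwise_le_getLast (M : List Int) (hM : List.Pairwise (· ≤ ·) M)
    (h : M ≠ []) : ∀ x ∈ M, x ≤ M.getLast h := by
  intro x hx
  obtain ⟨i, hi, hix⟩ := List.mem_iff_getElem.1 hx
  have hmono := pairwise_getD_mono M hM i (M.length - 1) (by omega) (by omega)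
  rw [List.getD_eq_getElem M 0 hi, hix, List.getD_eq_getElem M 0 (by omega)] at hmono
  rw [List.getLast_eq_getElem]
  exact hmono

-- the per-milestone step functions of the two folds agree
theorem step_eq (R : List Int) (res : List Int) (m : Int) :
    (match findIdx1 R m 0 with
     | some e => res ++ [(e : Int) + 1]
     | none => res)
    = (match (rmx R none).getLast? with
       | some last =>
           if m ≤ last then
             res ++ [(bsearch (rmx R none) m 0 (rmx R none).length : Int) + 1]
           else res
       | none => res) := by
  set M := rmx R none with hMdef
  have hpw : List.Pairwise (· ≤ ·) M := rmx_pairwise R none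
  have hffeq : findIdx1 R m 0 = findIdx1 M m 0 := ffEq R m 0 none (by simp)
  cases hlast : M.getLast? with
  | none =>
    have hMnil : M = [] := by simpa using hlast
    rw [hffeq, hMnil]
    simp [findIdx1]
  | some last =>
    have hMne : M ≠ [] := by intro hc; rw [hc] at hlast; simp at hlast
    have hlast' : M.getLast hMne = last := by
      have := List.getLast?_eq_some_getLast (l := M) hMne
      rw [hlast] at this; exact (Option.some.inj this).symm
    by_cases hm : m ≤ last
    · -- some entry reaches m, so findIdx1 is some idx and bsearch finds the same idx
      have hmem : last ∈ M := hlast' ▸ List.getLast_mem hMne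
      cases hff : findIdx1 M m 0 with
      | none => exact absurd hm ((ff_none M m).1 hff last hmem)
      | some idx =>
        obtain ⟨h1, h2, h3⟩ := ff_spec M m idx hff
        have hb : bsearch M m 0 M.length = idx :=
          bsearch_spec M m idx hpw h1 h2 h3 0 M.length (by omega) (by omega) (by omega)
        rw [hffeq, hff]
        simp [hm, hb]
    · -- m above the max: no entry reaches it
      have hffn : findIdx1 M m 0 = none := by
        rw [ff_none]
        intro x hx hmx
        exact hm (le_trans hmx (hlast' ▸ pairwise_le_getLast M hpw hMne x hx))
      rw [hffeq, hffn]
      simp [hm]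

theorem fold_eq (R : List Int) (ms : List Int) (res : List Int) :
    ms.foldl (fun result m =>
      match findIdx1 R m 0 with
      | some e => result ++ [(e : Int) + 1]
      | none => result) res
    = ms.foldl (fun result goal =>
      match (rmx R none).getLast? with
      | some last =>
          if goal ≤ last then
            result ++ [(bsearch (rmx R none) goal 0 (rmx R none).length : Int) + 1]
          else result
      | none => result) res := by
  induction ms generalizing res with
  | nil => rfl
  | cons m rest ih => simp only [List.foldl_cons, step_eq R res m, ih]

-- ===== VERDICT (by name: the statement is the Claim_ definition above) =====
theorem milestone_spec : Claim_equal_milestone := by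
  intro revenues milestones _
  unfold Spec_milestone milestone milestone_alt
  rw [foldl_rolling revenues 0 [], buildRunmax_eq revenues 0 none []]
  simpa using fold_eq (prefixes 0 revenues) milestones []
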